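-- pv_equiv track=rewrite | github.com/HanGuo97/hilt | hilt/profile_kernel.py | split_blocks
-- ===== SOURCE A (Python) =====
-- def split_blocks(lines):
--     blocks, cur = [], []
--     for L in lines:
--         if L.startswith('"Kernel Name"'):
--             if cur:
--                 blocks.append(cur)
--             cur = [L]
--         else:
--             cur.append(L)
--     if cur:
--         blocks.append(cur)
--     return blocks
-- ===== SOURCE B (Python) =====
-- def split_blocks(lines):
--     # boundary scan: find the end of each block, then slice it out wholesale
--     blocks = []
--     i, n = 0, len(lines)
--     while i < n:
--         j = i + 1
--         while j < n and not lines[j].startswith('"Kernel Name"'):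
--             j += 1
--         blocks.append(lines[i:j])
--         i = j
--     return blocks
-- ===== Notes on version B (the rewrite author's own statement) =====
-- stated objective: alternative
-- what changed: A accumulates a current block element by element in a fold with (blocks, cur) state and flushes on headers; B instead scans for the index of the next header and slices each block out of the input in one step, keeping no partial-block state.
import Mathlib
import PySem

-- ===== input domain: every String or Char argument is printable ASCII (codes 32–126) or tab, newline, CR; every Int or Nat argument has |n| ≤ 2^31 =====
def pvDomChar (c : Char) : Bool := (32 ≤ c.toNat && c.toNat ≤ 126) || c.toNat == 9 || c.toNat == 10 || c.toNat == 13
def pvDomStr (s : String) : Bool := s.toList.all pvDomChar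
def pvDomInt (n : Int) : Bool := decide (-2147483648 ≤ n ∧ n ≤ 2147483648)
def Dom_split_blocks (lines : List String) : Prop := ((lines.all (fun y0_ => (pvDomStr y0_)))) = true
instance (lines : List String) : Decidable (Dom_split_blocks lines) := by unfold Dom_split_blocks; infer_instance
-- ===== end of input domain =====

-- B replaces A's fold that grows a current block line by line with a boundary scan that
-- slices each whole block out at once (alternative decomposition, same cost).

-- ===== PORT A =====
def split_blocks (lines : List String) : List (List String) :=
  let st := lines.foldl
    (fun (st : List (List String) × List String) (L : String) =>
      if PySem.Str.startswith L "\"Kernel Name\"" then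
        (if st.2 ≠ [] then st.1 ++ [st.2] else st.1, [L])
      else
        (st.1, st.2 ++ [L]))
    ([], [])
  if st.2 ≠ [] then st.1 ++ [st.2] else st.1

-- ===== PORT B =====
-- inner while loop of Source B: advance j until the end or the next header line
def pvFindEnd (lines : List String) (j : Nat) : Nat :=
  if h : j < lines.length then
    if PySem.Str.startswith lines[j] "\"Kernel Name\"" then j
    else pvFindEnd lines (j + 1)
  else j
termination_by lines.length - j

-- termination fact for the outer loop (the port cites it in decreasing_by)
theorem pvFindEnd_ge (lines : List String) (j : Nat) : j ≤ pvFindEnd lines j := by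
  induction j using pvFindEnd.induct lines with
  | case1 j h hh => rw [pvFindEnd, dif_pos h, if_pos hh]
  | case2 j h hh ih => rw [pvFindEnd, dif_pos h, if_neg hh]; exact Nat.le_of_succ_le ih
  | case3 j h => rw [pvFindEnd, dif_neg h]

-- outer while loop of Source B: slice out the block [i:j], continue at j
def pvGo (lines : List String) (i : Nat) : List (List String) :=
  if h : i < lines.length then
    PySem.List.slice lines (some (i : Int)) (some ((pvFindEnd lines (i + 1) : Nat) : Int))
      :: pvGo lines (pvFindEnd lines (i + 1))
  else []
termination_by lines.length - i
decreasing_by have := pvFindEnd_ge lines (i + 1); omega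

def split_blocks_alt (lines : List String) : List (List String) := pvGo lines 0

-- ===== PRECONDITION & SPEC =====
def Spec_split_blocks (lines : List String) (out : List (List String)) : Prop := out = split_blocks_alt lines
instance (lines : List String) (out : List (List String)) : Decidable (Spec_split_blocks lines out) := by unfold Spec_split_blocks; infer_instance

-- ===== CLAIM (what is proved, stated in full; the proofs are below) =====
def Claim_equal_split_blocks : Prop := ∀ (lines : List String), Dom_split_blocks lines → Spec_split_blocks lines (split_blocks lines)

-- ===== LEMMAS AND PROOFS =====

def pvHdr (L : String) : Bool := PySem.Str.startswith L "\"Kernel Name\""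

-- recursive characterisation of A's fold state
def pvBlockify (cur : List String) (rest : List String) : List (List String) :=
  match rest with
  | [] => if cur = [] then [] else [cur]
  | L :: rs =>
    if pvHdr L then (if cur = [] then [] else [cur]) ++ pvBlockify [L] rs
    else pvBlockify (cur ++ [L]) rs

-- recursive characterisation of B's boundary scan
def pvSpec2 : List String → List (List String)
  | [] => []
  | L :: rs =>
    (L :: rs.takeWhile (fun x => !pvHdr x)) :: pvSpec2 (rs.dropWhile (fun x => !pvHdr x))
termination_by rest => rest.length
decreasing_by have := List.length_dropWhile_le (fun x => !pvHdr x) rs; simp; omega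

theorem pvA_eq_blockify (rest : List String) :
    ∀ (bs : List (List String)) (cur : List String),
      (let st := rest.foldl
        (fun (st : List (List String) × List String) (L : String) =>
          if PySem.Str.startswith L "\"Kernel Name\"" then
            (if st.2 ≠ [] then st.1 ++ [st.2] else st.1, [L])
          else
            (st.1, st.2 ++ [L]))
        (bs, cur)
       if st.2 ≠ [] then st.1 ++ [st.2] else st.1) = bs ++ pvBlockify cur rest := by
  induction rest with
  | nil => intro bs cur; simp [pvBlockify]; split_ifs <;> simp_all
  | cons L rs ih =>
    intro bs cur
    simp only [List.foldl_cons, pvBlockify, pvHdr]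
    by_cases hL : PySem.Str.startswith L "\"Kernel Name\""
    · simp only [hL, if_pos]
      by_cases hc : cur = []
      · subst hc; simpa using ih bs [L]
      · simp only [hc, if_neg, ne_eq, not_false_iff, if_pos]
        rw [ih (bs ++ [cur]) [L]]
        simp
    · simp only [hL, if_neg, Bool.false_eq_true, not_false_iff]
      exact ih bs (cur ++ [L])

theorem pvBlockify_nil_cons (L : String) (rs : List String) :
    pvBlockify [] (L :: rs) = pvBlockify [L] rs := by
  rw [pvBlockify]
  by_cases h : pvHdr L <;> simp [h]

theorem pvBlockify_ne (rest : List String) :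
    ∀ cur : List String, cur ≠ [] →
      pvBlockify cur rest =
        (cur ++ rest.takeWhile (fun x => !pvHdr x))
          :: pvBlockify [] (rest.dropWhile (fun x => !pvHdr x)) := by
  induction rest with
  | nil => intro cur hc; simp [pvBlockify, hc]
  | cons L rs ih =>
    intro cur hc
    rw [pvBlockify]
    by_cases h : pvHdr L
    · simp [h, hc, pvBlockify_nil_cons]
    · rw [if_neg (by simp [h]), ih (cur ++ [L]) (by simp)]
      simp [h]

theorem pvBlockify_eq_spec2 : ∀ (n : Nat) (rest : List String), rest.length ≤ n →
    pvBlockify [] rest = pvSpec2 rest := by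
  intro n
  induction n with
  | zero => intro rest h; rw [List.length_eq_zero_iff.mp (Nat.le_zero.mp h)]; simp [pvBlockify, pvSpec2]
  | succ n ih =>
    intro rest h
    match rest with
    | [] => simp [pvBlockify, pvSpec2]
    | L :: rs =>
      rw [pvBlockify_nil_cons, pvBlockify_ne rs [L] (by simp), pvSpec2]
      have hlen : (rs.dropWhile (fun x => !pvHdr x)).length ≤ n := by
        have := List.length_dropWhile_le (fun x => !pvHdr x) rs
        simp at h; omega
      rw [ih _ hlen]
      simp

-- take/drop through takeWhile/dropWhile
theorem pvTake_takeWhile {α : Type} (p : α → Bool) (xs : List α) :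
    xs.take (xs.takeWhile p).length = xs.takeWhile p := by
  calc xs.take (xs.takeWhile p).length
      = (xs.takeWhile p ++ xs.dropWhile p).take (xs.takeWhile p).length := by
        rw [List.takeWhile_append_dropWhile]
    _ = xs.takeWhile p := List.take_left
theorem pvDrop_takeWhile {α : Type} (p : α → Bool) (xs : List α) :
    xs.drop (xs.takeWhile p).length = xs.dropWhile p := by
  calc xs.drop (xs.takeWhile p).length
      = (xs.takeWhile p ++ xs.dropWhile p).drop (xs.takeWhile p).length := by
        rw [List.takeWhile_append_dropWhile]
    _ = xs.dropWhile p := List.drop_left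

theorem pvFindEnd_spec (lines : List String) (j : Nat) :
    pvFindEnd lines j = j + ((lines.drop j).takeWhile (fun x => !pvHdr x)).length := by
  induction j using pvFindEnd.induct lines with
  | case1 j h hh =>
    rw [pvFindEnd, dif_pos h, if_pos hh, List.drop_eq_getElem_cons h]
    simp only [List.takeWhile_cons, pvHdr, hh]
    simp
  | case2 j h hh ih =>
    simp only [Bool.not_eq_true] at hh
    rw [pvFindEnd, dif_pos h, if_neg (by rw [hh]; simp), ih, List.drop_eq_getElem_cons h]
    simp only [List.takeWhile_cons, pvHdr, hh]
    simp
    omega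
  | case3 j h =>
    rw [pvFindEnd, dif_neg h, List.drop_of_length_le (by omega)]
    simp

theorem pvDrop_findEnd (lines : List String) (j : Nat) :
    lines.drop (pvFindEnd lines j) = (lines.drop j).dropWhile (fun x => !pvHdr x) := by
  have h := pvDrop_takeWhile (fun x => !pvHdr x) (lines.drop j)
  rw [List.drop_drop] at h
  rw [pvFindEnd_spec]
  rw [Nat.add_comm] at h ⊢
  exact h

theorem pvGo_eq_spec2 (lines : List String) : ∀ i : Nat, pvGo lines i = pvSpec2 (lines.drop i) := by
  intro i
  induction i using pvGo.induct lines with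
  | case1 i h ih =>
    rw [pvGo, dif_pos h, ih, pvDrop_findEnd]
    rw [List.drop_eq_getElem_cons h, pvSpec2]
    congr 1
    rw [PySem.List.slice_natCast, pvFindEnd_spec]
    have : i + 1 + ((lines.drop (i + 1)).takeWhile (fun x => !pvHdr x)).length - i
        = ((lines.drop (i + 1)).takeWhile (fun x => !pvHdr x)).length + 1 := by omega
    rw [this, List.drop_eq_getElem_cons h, List.take_succ_cons, pvTake_takeWhile]
  | case2 i h =>
    rw [pvGo, dif_neg h, List.drop_of_length_le (by omega), pvSpec2]

-- ===== VERDICT (by name: the statement is the Claim_ definition above) =====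
theorem split_blocks_spec : Claim_equal_split_blocks := by
  intro lines _
  unfold Spec_split_blocks split_blocks split_blocks_alt
  rw [pvGo_eq_spec2 lines 0, List.drop_zero,
    ← pvBlockify_eq_spec2 lines.length lines (le_refl _)]
  simpa using pvA_eq_blockify lines [] []
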